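-- pv_equiv track=rewrite | github.com/Wopros46527351/Saper-demo | css/shifr/lolpop.py | wowme
-- ===== SOURCE A (Python) =====
-- def wowme(word):
--     s1=[]
--     for lol in range(26):
--         s=''
--         for i  in word:
--             s+=chr((ord(i)+lol-97)%26+97)
--         s1.append(s)
--     return s1
-- ===== SOURCE B (Python) =====
-- def wowme(word):
--     cur = ''.join(chr((ord(c) - 97) % 26 + 97) for c in word)
--     out = [cur]
--     for _ in range(25):
--         cur = ''.join(chr((ord(c) - 97 + 1) % 26 + 97) for c in cur)
--         out.append(cur)
--     return out
-- ===== Notes on version B (the rewrite author's own statement) =====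
-- stated objective: alternative
-- what changed: Instead of recomputing each of the 26 shifts independently from word with a nested loop, B normalizes word once to the shift-0 string and then derives each subsequent string from the PREVIOUS one by advancing every character by one, appending 26 strings incrementally.
import Mathlib
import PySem

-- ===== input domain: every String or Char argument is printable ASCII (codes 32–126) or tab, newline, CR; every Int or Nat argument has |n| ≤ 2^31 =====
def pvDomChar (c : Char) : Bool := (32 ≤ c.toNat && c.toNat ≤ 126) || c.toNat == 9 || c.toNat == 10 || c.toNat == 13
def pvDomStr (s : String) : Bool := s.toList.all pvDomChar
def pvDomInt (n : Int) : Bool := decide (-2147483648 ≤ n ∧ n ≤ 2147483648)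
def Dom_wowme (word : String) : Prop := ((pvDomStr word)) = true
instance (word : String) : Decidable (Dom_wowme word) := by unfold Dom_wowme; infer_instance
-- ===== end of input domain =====

-- B builds each of the 26 strings from the PREVIOUS one (normalize once, then advance by 1),
-- instead of A's recomputation of every shift directly from word; same results, same cost.
-- ===== PORT A =====
-- chr((ord(i)+lol-97)%26+97); Lean Int % (emod) matches Python % for the positive divisor 26
def aShift (lol : Nat) (c : Char) : Char :=
  Char.ofNat ((((c.toNat : Int) + lol - 97) % 26 + 97).toNat)

def wowme (word : String) : List String :=
  (List.range 26).foldl (fun s1 lol =>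
    s1 ++ [word.toList.foldl (fun s c => s.push (aShift lol c)) ""]) []

-- ===== PORT B =====
-- chr((ord(c)-97)%26+97)
def bNorm (c : Char) : Char :=
  Char.ofNat ((((c.toNat : Int) - 97) % 26 + 97).toNat)
-- chr((ord(c)-97+1)%26+97)
def bStep (c : Char) : Char :=
  Char.ofNat ((((c.toNat : Int) - 97 + 1) % 26 + 97).toNat)

def wowme_alt (word : String) : List String :=
  let cur := String.ofList (word.toList.map bNorm)
  ((List.range 25).foldl (fun (p : List String × String) _ =>
      let nxt := String.ofList (p.2.toList.map bStep)
      (p.1 ++ [nxt], nxt)) ([cur], cur)).1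

-- ===== PRECONDITION & SPEC =====
def Spec_wowme (word : String) (out : List String) : Prop := out = wowme_alt word
instance (word : String) (out : List String) : Decidable (Spec_wowme word out) := by unfold Spec_wowme; infer_instance

-- ===== CLAIM (what is proved, stated in full; the proofs are below) =====
def Claim_equal_wowme : Prop := ∀ (word : String), Dom_wowme word → Spec_wowme word (wowme word)

-- ===== LEMMAS AND PROOFS =====

-- the lol-th output string, the closed description both ports are reduced to
def aStr (word : String) (lol : Nat) : String := String.ofList (word.toList.map (aShift lol))

theorem aShift_toNat (lol : Nat) (c : Char) :
    ((aShift lol c).toNat : Int) = ((c.toNat : Int) + lol - 97) % 26 + 97 := by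
  unfold aShift
  have hv : ((((c.toNat : Int) + lol - 97) % 26 + 97).toNat).isValidChar :=
    Or.inl (by omega)
  rw [Char.toNat_ofNat, if_pos hv]
  omega

theorem bStep_aShift (lol : Nat) (c : Char) : bStep (aShift lol c) = aShift (lol + 1) c := by
  unfold bStep
  conv_rhs => rw [aShift]
  congr 1
  rw [aShift_toNat lol c]
  push_cast
  omega

theorem foldl_push_str (f : Char → Char) (l : List Char) (s : String) :
    l.foldl (fun s c => s.push (f c)) s = String.ofList (s.toList ++ l.map f) := by
  induction l generalizing s with
  | nil => simp
  | cons a t ih =>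
    simp only [List.foldl_cons, List.map_cons]
    rw [ih, String.toList_push]
    simp

theorem foldl_push_list {α β : Type} (f : α → β) (l : List α) (acc : List β) :
    l.foldl (fun s c => s ++ [f c]) acc = acc ++ l.map f := by
  induction l generalizing acc with
  | nil => simp
  | cons a t ih => simp [List.foldl_cons, ih]

theorem wowme_eq_map (word : String) :
    wowme word = (List.range 26).map (aStr word) := by
  unfold wowme
  rw [foldl_push_list (fun lol => word.toList.foldl (fun s c => s.push (aShift lol c)) "")
    (List.range 26) []]
  simp only [List.nil_append]
  refine List.map_congr_left (fun lol _ => ?_)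
  rw [foldl_push_str (aShift lol) word.toList ""]
  rfl

theorem step_aStr (word : String) (lol : Nat) :
    String.ofList ((aStr word lol).toList.map bStep) = aStr word (lol + 1) := by
  unfold aStr
  rw [String.toList_ofList, List.map_map]
  congr 1
  refine List.map_congr_left (fun c _ => ?_)
  simp [Function.comp, bStep_aShift]

theorem bloop (word : String) :
    ∀ (n : Nat) (acc : List String) (k : Nat),
      (List.range n).foldl (fun (p : List String × String) _ =>
          let nxt := String.ofList (p.2.toList.map bStep)
          (p.1 ++ [nxt], nxt)) (acc, aStr word k)
      = (acc ++ (List.range n).map (fun i => aStr word (k + 1 + i)), aStr word (k + n)) := by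
  intro n
  induction n with
  | zero => simp
  | succ m ih =>
    intro acc k
    rw [List.range_succ, List.foldl_append, ih]
    simp only [List.foldl_cons, List.foldl_nil, step_aStr]
    rw [List.map_append]
    simp only [List.map_cons, List.map_nil, List.append_assoc]
    have e1 : k + 1 + m = k + m + 1 := by omega
    have e2 : k + (m + 1) = k + m + 1 := by omega
    rw [e1, e2]

theorem wowme_alt_eq_map (word : String) :
    wowme_alt word = (List.range 26).map (aStr word) := by
  unfold wowme_alt
  have h0 : String.ofList (word.toList.map bNorm) = aStr word 0 := by
    unfold aStr
    congr 1
  simp only [h0]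
  rw [bloop word 25 [aStr word 0] 0]
  show [aStr word 0] ++ (List.range 25).map (fun i => aStr word (0 + 1 + i))
      = (List.range 26).map (aStr word)
  have h26 : (List.range 26).map (aStr word)
      = aStr word 0 :: (List.range 25).map (fun i => aStr word (i + 1)) := by
    rw [show (26 : Nat) = 25 + 1 from rfl, List.range_succ_eq_map, List.map_cons, List.map_map]
    rfl
  rw [h26, List.singleton_append]
  refine congrArg (List.cons (aStr word 0)) ?_
  exact List.map_congr_left (fun i _ => by congr 1; omega)

-- ===== VERDICT (by name: the statement is the Claim_ definition above) =====
theorem wowme_spec : Claim_equal_wowme := by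
  intro word _
  show wowme word = wowme_alt word
  rw [wowme_eq_map, wowme_alt_eq_map]
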